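-- pv_equiv track=rewrite | github.com/jasonfrowe/RPSopwith | tools/generate_terrain_mode2_assets.py | sopwith_flatten
-- ===== SOURCE A (Python) =====
-- SOURCE_MAX_Y = 199
--
-- def sopwith_flatten(ground: list[int], min_x: int, max_x: int, headroom: int) -> int:
--     """Mirror SDL Sopwith swinit.c: Flatten(minx, maxx, headroom)."""
--     min_h = min(ground[min_x:max_x + 1])
--     max_h = max(ground[min_x:max_x + 1])
--     ave_h = (min_h + max_h) // 2
--     ave_h = min(ave_h, SOURCE_MAX_Y - headroom - 1)
--
--     for x in range(min_x, max_x + 1):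
--         ground[x] = ave_h
--
--     return ave_h
-- ===== SOURCE B (Python) =====
-- SOURCE_MAX_Y = 199
--
-- def sopwith_flatten(ground: list[int], min_x: int, max_x: int, headroom: int) -> int:
--     """Sort the slice once; its first and last elements are the min and max."""
--     ordered = sorted(ground[min_x:max_x + 1])
--     if not ordered:
--         raise ValueError("empty terrain slice")
--     ave_h = min((ordered[0] + ordered[-1]) // 2, SOURCE_MAX_Y - headroom - 1)
--     ground[min_x:max_x + 1] = [ave_h] * len(ordered)
--     return ave_h
-- ===== Notes on version B (the rewrite author's own statement) =====
-- stated objective: alternative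
-- what changed: B replaces A's two extremum scans (min() and max() of the slice) and per-index fill loop by a sort-based formulation: the slice is sorted once, the min and max are read off as its first and last elements, and the flattened heights are written back with one slice assignment instead of an index loop.
import Mathlib
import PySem

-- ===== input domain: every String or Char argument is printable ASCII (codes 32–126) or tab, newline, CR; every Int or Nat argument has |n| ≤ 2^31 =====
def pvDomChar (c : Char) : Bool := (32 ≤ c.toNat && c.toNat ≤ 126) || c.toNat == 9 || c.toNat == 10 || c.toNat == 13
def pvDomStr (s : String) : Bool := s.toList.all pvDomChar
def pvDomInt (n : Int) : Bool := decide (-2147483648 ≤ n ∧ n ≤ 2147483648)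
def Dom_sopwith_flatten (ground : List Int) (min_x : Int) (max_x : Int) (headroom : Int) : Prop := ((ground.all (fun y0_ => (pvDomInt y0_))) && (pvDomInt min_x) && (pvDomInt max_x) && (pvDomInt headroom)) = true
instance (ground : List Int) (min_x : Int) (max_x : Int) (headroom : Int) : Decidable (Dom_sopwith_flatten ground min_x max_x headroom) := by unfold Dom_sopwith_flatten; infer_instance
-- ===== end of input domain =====

-- B is sort-based: sort the slice once, read the min and max as its first and last elements,
-- and write the flattened heights back with one slice assignment (objective: alternative).
-- Both Pythons mutate `ground` in place; the equivalence proved here is about the RETURN value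
-- only (with negative or reversed indices the two write back differently, the return agrees).

-- ===== PORT A =====
def sopwith_flatten (ground : List Int) (min_x : Int) (max_x : Int) (headroom : Int) : Int :=
  let min_h := (PySem.List.min? (PySem.List.slice ground (some min_x) (some (max_x + 1))) (fun y => y)).getD 0  -- some under Pre_
  let max_h := (PySem.List.max? (PySem.List.slice ground (some min_x) (some (max_x + 1))) (fun y => y)).getD 0
  let ave_h := PySem.Int.floordiv (min_h + max_h) 2
  let ave_h := min ave_h (199 - headroom - 1)
  -- fill loop: mutates the caller's list in Python; the return value is unaffected
  let _ := (PySem.List.pyRange min_x (max_x + 1) 1).foldl (fun g x => PySem.List.pySetD g x ave_h) ground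
  ave_h

-- ===== PORT B =====
def sopwith_flatten_alt (ground : List Int) (min_x : Int) (max_x : Int) (headroom : Int) : Int :=
  let ordered := PySem.List.sorted (PySem.List.slice ground (some min_x) (some (max_x + 1))) (fun y => y) false
  match hne : ordered with
  | [] => 0  -- B raises ValueError here; outside Pre_
  | w0 :: rest =>
    -- ordered[0] = w0, ordered[-1] = getLast (exact: list is nonempty)
    let ave_h := min (PySem.Int.floordiv (w0 + (w0 :: rest).getLast (List.cons_ne_nil _ _)) 2) (199 - headroom - 1)
    -- slice assignment ground[min_x:max_x+1] = [ave_h]*len(ordered): mutates the caller's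
    -- list in Python (hand port, exact for in-range slices); the return value is unaffected
    let _ := PySem.List.slice ground none (some min_x) ++ List.replicate ordered.length ave_h ++ PySem.List.slice ground (some (max_x + 1)) none
    ave_h

-- ===== PRECONDITION & SPEC =====
-- Exactly where A returns: the slice must be nonempty (else min() raises ValueError) and every
-- index min_x..max_x written by A's fill loop must be a valid Python index (else IndexError).
def Pre_sopwith_flatten (ground : List Int) (min_x : Int) (max_x : Int) (headroom : Int) : Prop :=
  PySem.List.slice ground (some min_x) (some (max_x + 1)) ≠ [] ∧
  -(ground.length : Int) ≤ min_x ∧ max_x < (ground.length : Int)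
instance (ground : List Int) (min_x : Int) (max_x : Int) (headroom : Int) : Decidable (Pre_sopwith_flatten ground min_x max_x headroom) := by unfold Pre_sopwith_flatten; infer_instance

def pvWitness_sopwith_flatten : List Int × Int × Int × Int := ([10, 30, 20], 0, 2, 50)

def Spec_sopwith_flatten (ground : List Int) (min_x : Int) (max_x : Int) (headroom : Int) (out : Int) : Prop := out = sopwith_flatten_alt ground min_x max_x headroom
instance (ground : List Int) (min_x : Int) (max_x : Int) (headroom : Int) (out : Int) : Decidable (Spec_sopwith_flatten ground min_x max_x headroom out) := by unfold Spec_sopwith_flatten; infer_instance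

-- ===== CLAIM =====
def Claim_equal_sopwith_flatten : Prop := ∀ (ground : List Int) (min_x : Int) (max_x : Int) (headroom : Int), Dom_sopwith_flatten ground min_x max_x headroom → Pre_sopwith_flatten ground min_x max_x headroom → Spec_sopwith_flatten ground min_x max_x headroom (sopwith_flatten ground min_x max_x headroom)

-- ===== LEMMAS AND PROOFS =====

-- In a (≤)-pairwise list every element is at most the last one.
theorem mem_le_getLast (l : List Int) (hp : l.Pairwise (fun a b => a ≤ b)) (y : Int)
    (hy : y ∈ l) (h : l ≠ []) : y ≤ l.getLast h := by
  induction l with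
  | nil => cases hy
  | cons a t ih =>
    rcases List.pairwise_cons.mp hp with ⟨ha, ht⟩
    cases t with
    | nil => simp_all
    | cons b u =>
      rcases List.mem_cons.mp hy with rfl | hy'
      · exact le_trans (ha _ (List.getLast_mem _)) (le_refl _) |>.trans_eq
          (by rw [List.getLast_cons (List.cons_ne_nil _ _)])
      · rw [List.getLast_cons (List.cons_ne_nil _ _)]
        exact ih ht hy' (List.cons_ne_nil _ _)

-- Head of the sorted slice = A's running min; last of the sorted slice = A's running max.
theorem sorted_head_eq_min (s0 : Int) (st : List Int) (w0 : Int) (rest : List Int)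
    (hs : PySem.List.sorted (s0 :: st) (fun y => y) false = w0 :: rest) :
    st.foldl min s0 = w0 := by
  have hmin := PySem.List.min?_id_cons (x := s0) (t := st)
  have hmem : st.foldl min s0 ∈ s0 :: st := PySem.List.min?_mem hmin
  have hisMin : ∀ y ∈ s0 :: st, st.foldl min s0 ≤ y := by
    intro y hy; simpa using PySem.List.min?_isMin hmin y hy
  have hw0mem : w0 ∈ s0 :: st := by
    have := (PySem.List.mem_sorted (xs := s0 :: st) (key := fun y => y) (rev := false) (x := w0)).mp
    exact this (by rw [hs]; exact List.mem_cons_self)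
  have h1 : st.foldl min s0 ≤ w0 := hisMin _ hw0mem
  have h2 : w0 ≤ st.foldl min s0 := by
    have := PySem.List.key_head_sorted_le (xs := s0 :: st) (key := fun y => y) hs
    simpa using this _ hmem
  omega

theorem sorted_last_eq_max (s0 : Int) (st : List Int) (w0 : Int) (rest : List Int)
    (hs : PySem.List.sorted (s0 :: st) (fun y => y) false = w0 :: rest) :
    st.foldl max s0 = (w0 :: rest).getLast (List.cons_ne_nil _ _) := by
  have hmax := PySem.List.max?_id_cons (x := s0) (t := st)
  have hmem : st.foldl max s0 ∈ s0 :: st := PySem.List.max?_mem hmax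
  have hisMax : ∀ y ∈ s0 :: st, y ≤ st.foldl max s0 := by
    intro y hy; simpa using PySem.List.max?_isMax hmax y hy
  have hpw : (w0 :: rest).Pairwise (fun a b => a ≤ b) := by
    have := PySem.List.sorted_pairwise (xs := s0 :: st) (key := fun y => y)
    rw [hs] at this; simpa using this
  have hLmem : (w0 :: rest).getLast (List.cons_ne_nil _ _) ∈ s0 :: st := by
    have hmem' : (w0 :: rest).getLast (List.cons_ne_nil _ _) ∈ w0 :: rest := List.getLast_mem _
    exact (PySem.List.mem_sorted (s0 :: st) (fun y => y) false _).mp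
      (by rw [hs]; exact hmem')
  have hmem'' : st.foldl max s0 ∈ w0 :: rest := by
    have := (PySem.List.mem_sorted (xs := s0 :: st) (key := fun y => y) (rev := false) (x := st.foldl max s0)).mpr hmem
    rwa [hs] at this
  have h1 : st.foldl max s0 ≤ (w0 :: rest).getLast (List.cons_ne_nil _ _) :=
    mem_le_getLast _ hpw _ hmem'' _
  have h2 : (w0 :: rest).getLast (List.cons_ne_nil _ _) ≤ st.foldl max s0 := hisMax _ hLmem
  omega

-- ===== VERDICT =====
theorem sopwith_flatten_spec : Claim_equal_sopwith_flatten := by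
  intro ground min_x max_x headroom _ hpre
  unfold Spec_sopwith_flatten sopwith_flatten sopwith_flatten_alt
  obtain ⟨hne, -, -⟩ := hpre
  cases hsl : PySem.List.slice ground (some min_x) (some (max_x + 1)) with
  | nil => exact absurd hsl hne
  | cons s0 st =>
    cases hs : PySem.List.sorted (s0 :: st) (fun y => y) false with
    | nil => exact absurd ((PySem.List.sorted_eq_nil_iff _ _ _).mp hs) (List.cons_ne_nil _ _)
    | cons w0 rest =>
      simp only [PySem.List.min?_id_cons, PySem.List.max?_id_cons, Option.getD_some,
        sorted_head_eq_min s0 st w0 rest hs, sorted_last_eq_max s0 st w0 rest hs]
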